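-- pv_equiv track=rewrite | github.com/yeeliang94/XBRL-Agent | verify_ordofliq_bugs_v2.py | infer_sections
-- ===== SOURCE A (Python) =====
-- from typing import Dict, List, Tuple, Optional, Set
--
-- def infer_sections(labels: Dict[int, str]) -> Dict[int, str]:
--     """
--     Build a mapping of row -> section name by looking for major section markers
--     (rows that are subtotals or major headers).
--
--     For OrderOfLiquidity, sections typically:
--     - Start after current assets
--     - Include inventories, current receivables, derivatives, cash
--     - Then equity
--     - Then liabilities (borrowings, payables)
--     """
--     sections = {}
--     current_section = "UNKNOWN"
--
--     for row in sorted(labels.keys()):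
--         label = labels[row]
--
--         # Major section markers (these define section boundaries)
--         if any(marker in label.lower() for marker in [
--             "non-current",
--             "current asset",
--             "equity",
--             "borrowing",
--             "payable",
--             "cash",
--             "inventories",
--             "receivable",
--             "derivative"
--         ]):
--             # Try to infer section from label
--             if "equity" in label.lower():
--                 current_section = "EQUITY"
--             elif "borrowing" in label.lower():
--                 current_section = "BORROWINGS"
--             elif "payable" in label.lower():
--                 current_section = "PAYABLES"
--             elif "cash" in label.lower() and "equivalents" in label.lower():
--                 current_section = "CASH"
--             elif "inventory" in label.lower() or "inventories" in label.lower():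
--                 current_section = "INVENTORIES"
--             elif "receivable" in label.lower():
--                 current_section = "RECEIVABLES"
--             elif "derivative" in label.lower():
--                 current_section = "DERIVATIVES"
--             elif "prepaid" in label.lower() or "accrual" in label.lower():
--                 current_section = "PREPAID_ACCRUALS"
--
--         sections[row] = current_section
--
--     return sections
-- ===== SOURCE B (Python) =====
-- def infer_sections(labels):
--     def classify(label):
--         l = label.lower()
--         if not any(m in l for m in ["non-current", "current asset", "equity", "borrowing",
--                                     "payable", "cash", "inventories", "receivable", "derivative"]):
--             return None
--         if "equity" in l:
--             return "EQUITY"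
--         if "borrowing" in l:
--             return "BORROWINGS"
--         if "payable" in l:
--             return "PAYABLES"
--         if "cash" in l and "equivalents" in l:
--             return "CASH"
--         if "inventory" in l or "inventories" in l:
--             return "INVENTORIES"
--         if "receivable" in l:
--             return "RECEIVABLES"
--         if "derivative" in l:
--             return "DERIVATIVES"
--         if "prepaid" in l or "accrual" in l:
--             return "PREPAID_ACCRUALS"
--         return None
--
--     rows = sorted(labels.keys())
--     boundaries = [(r, s) for r in rows
--                   for s in (classify(labels[r]),) if s is not None]
--     out = {}
--     for r in rows:
--         out[r] = next((s for br, s in reversed(boundaries) if br <= r), "UNKNOWN")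
--     return out
-- ===== Notes on version B (the rewrite author's own statement) =====
-- stated objective: alternative
-- what changed: Replaces A's carried-state forward scan that threads current_section through a dict-building loop with an index-then-lookup design: a classify(label) helper marks boundary rows in one pass, and each row's section is then found independently as the most recent boundary at or before it (UNKNOWN if none precedes).
import Mathlib
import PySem

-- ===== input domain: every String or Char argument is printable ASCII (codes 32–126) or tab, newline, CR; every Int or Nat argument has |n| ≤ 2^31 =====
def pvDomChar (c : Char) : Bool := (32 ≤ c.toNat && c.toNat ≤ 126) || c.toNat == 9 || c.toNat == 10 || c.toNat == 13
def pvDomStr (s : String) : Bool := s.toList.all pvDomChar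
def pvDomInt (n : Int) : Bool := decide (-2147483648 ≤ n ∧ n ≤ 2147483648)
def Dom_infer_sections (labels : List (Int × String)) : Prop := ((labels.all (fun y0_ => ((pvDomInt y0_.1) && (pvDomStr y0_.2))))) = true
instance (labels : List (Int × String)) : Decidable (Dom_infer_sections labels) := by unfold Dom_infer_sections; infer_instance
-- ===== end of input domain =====

-- B replaces A's carried-state scan with a boundary index built by a classify helper plus a
-- per-row most-recent-boundary lookup (objective: alternative decomposition, same cost class).

-- ===== PORT A =====
-- the block of A's loop body computing the (possibly unchanged) current_section
def pvCurA (st2 : String) (label : String) : String :=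
  if ["non-current", "current asset", "equity", "borrowing", "payable", "cash",
      "inventories", "receivable", "derivative"].any
       (fun m => PySem.Str.isIn m (PySem.Str.lower label)) then
    if PySem.Str.isIn "equity" (PySem.Str.lower label) then "EQUITY"
    else if PySem.Str.isIn "borrowing" (PySem.Str.lower label) then "BORROWINGS"
    else if PySem.Str.isIn "payable" (PySem.Str.lower label) then "PAYABLES"
    else if PySem.Str.isIn "cash" (PySem.Str.lower label) && PySem.Str.isIn "equivalents" (PySem.Str.lower label) then "CASH"
    else if PySem.Str.isIn "inventory" (PySem.Str.lower label) || PySem.Str.isIn "inventories" (PySem.Str.lower label) then "INVENTORIES"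
    else if PySem.Str.isIn "receivable" (PySem.Str.lower label) then "RECEIVABLES"
    else if PySem.Str.isIn "derivative" (PySem.Str.lower label) then "DERIVATIVES"
    else if PySem.Str.isIn "prepaid" (PySem.Str.lower label) || PySem.Str.isIn "accrual" (PySem.Str.lower label) then "PREPAID_ACCRUALS"
    else st2
  else st2

def infer_sections (labels : List (Int × String)) : List (Int × String) :=
  let d := PySem.Dict.ofList labels
  (((PySem.List.sorted d.keys (fun x => x) false).foldl
      (fun (st : PySem.Dict Int String × String) row =>
        let cur := pvCurA st.2 (d.getD row "")
        (st.1.insert row cur, cur))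
      (PySem.Dict.empty, "UNKNOWN")).1).items

-- ===== PORT B =====
def pvClassify (label : String) : Option String :=
  let l := PySem.Str.lower label
  if !(["non-current", "current asset", "equity", "borrowing", "payable", "cash",
        "inventories", "receivable", "derivative"].any (fun m => PySem.Str.isIn m l)) then none
  else if PySem.Str.isIn "equity" l then some "EQUITY"
  else if PySem.Str.isIn "borrowing" l then some "BORROWINGS"
  else if PySem.Str.isIn "payable" l then some "PAYABLES"
  else if PySem.Str.isIn "cash" l && PySem.Str.isIn "equivalents" l then some "CASH"
  else if PySem.Str.isIn "inventory" l || PySem.Str.isIn "inventories" l then some "INVENTORIES"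
  else if PySem.Str.isIn "receivable" l then some "RECEIVABLES"
  else if PySem.Str.isIn "derivative" l then some "DERIVATIVES"
  else if PySem.Str.isIn "prepaid" l || PySem.Str.isIn "accrual" l then some "PREPAID_ACCRUALS"
  else none

def infer_sections_alt (labels : List (Int × String)) : List (Int × String) :=
  let d := PySem.Dict.ofList labels
  let rows := PySem.List.sorted d.keys (fun x => x) false
  let boundaries := rows.filterMap (fun r => (pvClassify (d.getD r "")).map (fun s => (r, s)))
  rows.map (fun r =>
    (r, (((boundaries.reverse.find? (fun p => decide (p.1 ≤ r))).map Prod.snd).getD "UNKNOWN")))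

-- ===== PRECONDITION & SPEC =====
def Spec_infer_sections (labels : List (Int × String)) (out : List (Int × String)) : Prop := out = infer_sections_alt labels
instance (labels : List (Int × String)) (out : List (Int × String)) : Decidable (Spec_infer_sections labels out) := by unfold Spec_infer_sections; infer_instance

-- ===== CLAIM (what is proved, stated in full; the proofs are below) =====
def Claim_equal_infer_sections : Prop := ∀ (labels : List (Int × String)), Dom_infer_sections labels → Spec_infer_sections labels (infer_sections labels)

-- ===== LEMMAS AND PROOFS =====

-- A's scan, abstracted: the list of (row, section) pairs the loop assigns
def pvScan (lab : Int → String) : List Int → String → List (Int × String)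
  | [], _ => []
  | r :: rs, cur =>
    let c := (pvClassify (lab r)).getD cur
    (r, c) :: pvScan lab rs c

-- A's elif chain updates the carried section exactly as classify-with-default
theorem pvCurA_eq_classify (cur label : String) :
    pvCurA cur label = (pvClassify label).getD cur := by
  unfold pvCurA pvClassify
  rcases hg : (["non-current", "current asset", "equity", "borrowing", "payable", "cash",
      "inventories", "receivable", "derivative"].any
        (fun m => PySem.Str.isIn m (PySem.Str.lower label))) with _ | _
  · simp only [hg]; rfl
  · simp only [hg, Bool.not_true, Bool.false_eq_true, if_false]
    split_ifs <;> simp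

-- A's fold over fresh distinct rows appends pvScan to the accumulated items
theorem pvA_items (lab : Int → String) (rows : List Int) (sec : PySem.Dict Int String)
    (cur : String) (hf : ∀ r ∈ rows, sec.contains r = false) (hn : rows.Nodup) :
    ((rows.foldl
        (fun (st : PySem.Dict Int String × String) row =>
          let c := pvCurA st.2 (lab row)
          (st.1.insert row c, c))
        (sec, cur)).1).items = sec.items ++ pvScan lab rows cur := by
  induction rows generalizing sec cur with
  | nil => simp [pvScan]
  | cons r rs ih =>
    simp only [List.foldl_cons, pvScan]
    rw [ih]
    · rw [PySem.Dict.items_insert_of_not_contains _ _ (hf r (by simp))]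
      simp [pvCurA_eq_classify]
    · intro r' hr'
      rw [PySem.Dict.contains_insert]
      have hne : r' ≠ r := by
        rintro rfl; exact (List.nodup_cons.mp hn).1 hr'
      simp [hne, hf r' (List.mem_cons_of_mem _ hr')]
    · exact (List.nodup_cons.mp hn).2

-- no boundary lies at or before a row smaller than all boundary rows
theorem pvFind_none (bs : List (Int × String)) (r : Int) (h : ∀ p ∈ bs, r < p.1) :
    bs.reverse.find? (fun p => decide (p.1 ≤ r)) = none := by
  rw [List.find?_eq_none]
  intro p hp
  have := h p (List.mem_reverse.mp hp)
  simp; omega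

-- B's per-row lookup, named
def pvLookup (bs : List (Int × String)) (r : Int) (dflt : String) : String :=
  ((bs.reverse.find? (fun p => decide (p.1 ≤ r))).map Prod.snd).getD dflt

-- prepending a boundary at row ≤ r is the same as restarting the default at its section
theorem pvLookup_cons (bs : List (Int × String)) (r b : Int) (s dflt : String) (hb : b ≤ r) :
    pvLookup ((b, s) :: bs) r dflt = pvLookup bs r s := by
  unfold pvLookup
  rw [List.reverse_cons, List.find?_append]
  cases hfind : bs.reverse.find? (fun p => decide (p.1 ≤ r)) <;> simp [hb]

-- THE bridge: on a strictly increasing row list, B's boundary-index lookup reproduces A's scan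
theorem pvB_eq_scan (lab : Int → String) (rows : List Int) (cur : String)
    (hs : rows.Pairwise (· < ·)) :
    rows.map (fun r =>
      (r, pvLookup (rows.filterMap (fun r' => (pvClassify (lab r')).map (fun s => (r', s)))) r cur))
    = pvScan lab rows cur := by
  induction rows generalizing cur with
  | nil => simp [pvScan]
  | cons r rs ih =>
    have hlt : ∀ r' ∈ rs, r < r' := fun r' h => (List.pairwise_cons.mp hs).1 r' h
    have htail := (List.pairwise_cons.mp hs).2
    have hbs : ∀ p ∈ rs.filterMap (fun r' => (pvClassify (lab r')).map (fun s => (r', s))), r < p.1 := by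
      intro p hp
      obtain ⟨r', hr', hmap⟩ := List.mem_filterMap.mp hp
      cases hc : pvClassify (lab r') with
      | none => rw [hc] at hmap; simp at hmap
      | some s =>
        rw [hc] at hmap
        simp only [Option.map_some, Option.some.injEq] at hmap
        subst hmap
        exact hlt r' hr'
    simp only [List.filterMap_cons]
    cases hc : pvClassify (lab r) with
    | none =>
      simp only [Option.map_none, pvScan, hc, Option.getD_none, List.map_cons]
      rw [List.cons_eq_cons]
      refine ⟨?_, ih cur htail⟩
      have h1 : pvLookup (rs.filterMap (fun r' => (pvClassify (lab r')).map (fun s => (r', s)))) r cur = cur := by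
        unfold pvLookup; rw [pvFind_none _ _ hbs]; rfl
      rw [h1]
    | some s =>
      simp only [Option.map_some, pvScan, hc, Option.getD_some, List.map_cons]
      rw [List.cons_eq_cons]
      constructor
      · have h1 : pvLookup ((r, s) :: rs.filterMap (fun r' => (pvClassify (lab r')).map (fun s => (r', s)))) r cur = s := by
          rw [pvLookup_cons _ _ _ _ _ le_rfl]
          unfold pvLookup; rw [pvFind_none _ _ hbs]; rfl
        rw [h1]
      · rw [← ih s htail]
        apply List.map_congr_left
        intro r' hr'
        rw [pvLookup_cons _ _ _ _ _ (le_of_lt (hlt r' hr'))]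

-- ===== VERDICT (by name: the statement is the Claim_ definition above) =====
theorem infer_sections_spec : Claim_equal_infer_sections := by
  intro labels _
  unfold Spec_infer_sections infer_sections infer_sections_alt
  set d := PySem.Dict.ofList labels with hd
  set rows := PySem.List.sorted d.keys (fun x => x) false with hrows
  have hperm : rows.Perm d.keys := PySem.List.sorted_perm d.keys (fun x => x) false
  have hnodup : rows.Nodup := hperm.nodup_iff.mpr (PySem.Dict.nodup_keys_ofList labels)
  have hle : rows.Pairwise (fun a b => a ≤ b) := PySem.List.sorted_pairwise d.keys (fun x => x)
  have hlt : rows.Pairwise (· < ·) := by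
    have := List.Pairwise.and hle hnodup
    exact this.imp (fun h => lt_of_le_of_ne h.1 h.2)
  rw [pvA_items (fun r => d.getD r "") rows PySem.Dict.empty "UNKNOWN"
        (fun r _ => PySem.Dict.contains_empty r) hnodup]
  rw [← pvB_eq_scan (fun r => d.getD r "") rows "UNKNOWN" hlt]
  simp only [pvLookup]
  rfl
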